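-- pv_equiv track=rewrite | github.com/Tofuni/code_demos_python | exercises/get_matching_substrs.py | matching_substr
-- ===== SOURCE A (Python) =====
-- def matching_substr(txt1, txt2):
-- 	r = []
-- 	for i in range(len(txt1)):
-- 		for j in range(len(txt2)):
-- 			if txt1[i] == txt2[j]:
-- 				r.append(txt1[i])
-- 				isMatch = True
-- 				count = 1
-- 				while isMatch:
-- 					isMatch = False
-- 					if i+count == len(txt1) or j+count == len(txt2):
-- 						break
-- 					if txt1[i+count] == txt2[j+count]:
-- 						isMatch = True
-- 						count += 1
-- 						r.append(txt1[i:i+count])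
-- 	return r
-- ===== SOURCE B (Python) =====
-- def matching_substr(txt1, txt2):
--     n, m = len(txt1), len(txt2)
--     # dp[i][j] = length of common run starting at txt1[i], txt2[j]; row n is all zeros
--     dp = [[0] * (m + 1) for _ in range(n + 1)]
--     for i in range(n - 1, -1, -1):
--         for j in range(m - 1, -1, -1):
--             if txt1[i] == txt2[j]:
--                 dp[i][j] = dp[i + 1][j + 1] + 1
--     r = []
--     for i in range(n):
--         for L in dp[i]:
--             for k in range(1, L + 1):
--                 r.append(txt1[i:i + k])
--     return r
-- ===== Notes on version B (the rewrite author's own statement) =====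
-- stated objective: alternative
-- what changed: Replaces A's per-cell while-loop re-extension of each diagonal with a bottom-up DP table of run lengths computed once, followed by a separate emission pass.
import Mathlib
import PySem

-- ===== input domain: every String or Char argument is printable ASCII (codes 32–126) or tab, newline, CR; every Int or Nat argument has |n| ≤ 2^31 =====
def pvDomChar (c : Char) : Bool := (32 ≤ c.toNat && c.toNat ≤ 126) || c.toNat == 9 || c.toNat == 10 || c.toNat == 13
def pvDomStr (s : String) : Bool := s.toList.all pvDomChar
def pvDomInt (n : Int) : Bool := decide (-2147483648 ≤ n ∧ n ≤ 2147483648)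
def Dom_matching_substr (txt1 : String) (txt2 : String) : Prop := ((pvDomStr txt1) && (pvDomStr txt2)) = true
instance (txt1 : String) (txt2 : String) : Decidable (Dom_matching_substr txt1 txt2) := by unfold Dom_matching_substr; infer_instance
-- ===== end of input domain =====

-- B replaces A's per-cell while-loop diagonal extension with a bottom-up DP table of
-- run lengths computed once, then a separate emission pass (objective: alternative algorithm).

-- ===== PORT A =====
-- A's inner `while isMatch` loop.  Python breaks on `i+count == len(txt1) or j+count == len(txt2)`;
-- since i+count never exceeds the lengths here, the `<` guard below is the same test, made total.
-- `txt1[i:i+count]` (indices in range) is exactly `(t1.drop i).take count`.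
def loopA (t1 t2 : List Char) (i j count : Nat) (r : List String) : List String :=
  if _h : i + count < t1.length ∧ j + count < t2.length then
    if t1.getD (i + count) ' ' = t2.getD (j + count) ' ' then
      loopA t1 t2 i j (count + 1) (r ++ [String.mk ((t1.drop i).take (count + 1))])
    else r
  else r
termination_by t1.length - (i + count)
decreasing_by omega

def matching_substr (txt1 : String) (txt2 : String) : List String :=
  let t1 := txt1.toList
  let t2 := txt2.toList
  (List.range t1.length).foldl (fun r i =>
    (List.range t2.length).foldl (fun r j =>
      if t1.getD i ' ' = t2.getD j ' ' then
        loopA t1 t2 i j 1 (r ++ [String.mk [t1.getD i ' ']])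
      else r) r) []

-- ===== PORT B =====
-- dp row i from row i+1: dp[i][j] = dp[i+1][j+1] + 1 if txt1[i]==txt2[j] else 0, sentinel 0 at j = m.
def rowB (c : Char) (t2 : List Char) (nxt : List Nat) : List Nat :=
  match t2 with
  | [] => [0]
  | ch :: rest => (if c = ch then nxt.tail.headD 0 + 1 else 0) :: rowB c rest nxt.tail

-- rows i = 0 .. n-1, each from the row below; the missing row n is all zeros.
def rowsB (t2 : List Char) : List Char → List (List Nat)
  | [] => []
  | c :: rest =>
    let rs := rowsB t2 rest
    rowB c t2 (rs.headD (List.replicate (t2.length + 1) 0)) :: rs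

-- emission pass: for each i, each run length L in dp row i, emit txt1[i:i+k] for k = 1..L
-- (`t1.tails` pairs row i with the suffix `t1.drop i`; `txt1[i:i+k]` = `(t1.drop i).take k`).
def matching_substr_alt (txt1 : String) (txt2 : String) : List String :=
  let t1 := txt1.toList
  let t2 := txt2.toList
  ((rowsB t2 t1).zip t1.tails).flatMap (fun p =>
    p.1.flatMap (fun L => (List.range L).map (fun k => String.mk (p.2.take (k + 1)))))

-- ===== PRECONDITION & SPEC =====
def Spec_matching_substr (txt1 : String) (txt2 : String) (out : List String) : Prop := out = matching_substr_alt txt1 txt2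
instance (txt1 : String) (txt2 : String) (out : List String) : Decidable (Spec_matching_substr txt1 txt2 out) := by unfold Spec_matching_substr; infer_instance

-- ===== CLAIM (what is proved, stated in full; the proofs are below) =====
def Claim_equal_matching_substr : Prop := ∀ (txt1 : String) (txt2 : String), Dom_matching_substr txt1 txt2 → Spec_matching_substr txt1 txt2 (matching_substr txt1 txt2)

-- ===== LEMMAS AND PROOFS =====

-- length of the common diagonal run at the heads of two suffixes
def runLen : List Char → List Char → Nat
  | a :: as, b :: bs => if a = b then runLen as bs + 1 else 0
  | _, _ => 0

theorem runLen_nil_left (u : List Char) : runLen [] u = 0 := by cases u <;> rfl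

theorem runLen_nil_right (s : List Char) : runLen s [] = 0 := by cases s <;> rfl

-- the strings A emits at cell (i, j), phrased on the suffixes
def cellOut (s u : List Char) : List String :=
  (List.range (runLen s u)).map (fun k => String.mk (s.take (k + 1)))

theorem cellOut_nil_right (s : List Char) : cellOut s [] = [] := by
  simp [cellOut, runLen_nil_right]

-- A's while loop appends the prefixes of lengths count+1 .. count+runLen of the diagonal
theorem loopA_spec (t1 t2 : List Char) (i j count : Nat) (r : List String) :
    loopA t1 t2 i j count r =
      r ++ (List.range (runLen (t1.drop (i + count)) (t2.drop (j + count)))).map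
        (fun k => String.mk ((t1.drop i).take (count + 1 + k))) := by
  fun_induction loopA t1 t2 i j count r with
  | case1 count r _h heq ih =>
    obtain ⟨h1, h2⟩ := _h
    rw [ih]
    rw [List.drop_eq_getElem_cons h1, List.drop_eq_getElem_cons h2]
    rw [List.getD_eq_getElem t1 ' ' h1, List.getD_eq_getElem t2 ' ' h2] at heq
    simp only [runLen, if_pos heq]
    rw [List.range_succ_eq_map]
    simp only [List.map_cons, List.map_map, List.append_assoc, List.cons_append]
    rw [show i + count + 1 = i + (count + 1) from by omega,
        show j + count + 1 = j + (count + 1) from by omega]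
    congr 2
    apply List.map_congr_left
    intro k _
    simp only [Function.comp_apply]
    congr 2
    omega
  | case2 count r _h heq =>
    obtain ⟨h1, h2⟩ := _h
    rw [List.drop_eq_getElem_cons h1, List.drop_eq_getElem_cons h2]
    rw [List.getD_eq_getElem t1 ' ' h1, List.getD_eq_getElem t2 ' ' h2] at heq
    simp [runLen, heq]
  | case3 count r _h =>
    rw [Classical.not_and_iff_not_or_not] at _h
    rcases _h with h1 | h1
    · rw [show t1.drop (i + count) = [] from List.drop_eq_nil_of_le (by omega), runLen_nil_left]
      simp
    · rw [show t2.drop (j + count) = [] from List.drop_eq_nil_of_le (by omega), runLen_nil_right]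
      simp

-- generic: a foldl that only appends is a flatMap
theorem foldl_append_gen {α β : Type} (l : List β) (f : List α → β → List α) (g : β → List α)
    (h : ∀ r x, x ∈ l → f r x = r ++ g x) :
    ∀ init, l.foldl f init = init ++ l.flatMap g := by
  induction l with
  | nil => simp
  | cons x xs ih =>
    intro init
    simp only [List.foldl_cons, List.flatMap_cons]
    rw [h init x (by simp), ih (fun r y hy => h r y (by simp [hy])), List.append_assoc]

-- generic: flatMap over `range l.length` of a function of the suffixes
theorem range_flatMap_drop {α γ : Type} (l : List γ) (f : List γ → List α) :
    (List.range l.length).flatMap (fun i => f (l.drop i)) ++ f [] =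
      l.tails.flatMap f := by
  induction l with
  | nil => simp [List.tails]
  | cons c rest ih =>
    rw [List.length_cons, List.range_succ_eq_map, List.flatMap_cons, List.flatMap_map]
    simp only [List.drop_zero, List.drop_succ_cons]
    rw [List.tails_cons, List.flatMap_cons, List.append_assoc, ih]

theorem tails_ne_nil' {α : Type} (l : List α) : l.tails ≠ [] := by
  cases l <;> simp [List.tails]

-- every tails list is its proper part followed by the final []
theorem tails_eq_dropLast_concat {α : Type} (l : List α) :
    l.tails = l.tails.dropLast ++ [([] : List α)] := by
  induction l with
  | nil => simp [List.tails]
  | cons c rest ih =>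
    rw [List.tails_cons]
    rw [show ((c :: rest) :: rest.tails).dropLast = (c :: rest) :: rest.tails.dropLast from by
      cases h : rest.tails with
      | nil => exact absurd h (tails_ne_nil' _)
      | cons a as => simp]
    rw [List.cons_append, ← ih]

theorem headD_tails_map {α : Type} (f : List Char → α) (d : α) (l : List Char) :
    ((l.tails.map f).headD d) = f l := by
  cases l <;> simp [List.tails]

-- rowB computes the runLen values along one row
theorem rowB_spec (c : Char) (s : List Char) :
    ∀ t2 : List Char, rowB c t2 (t2.tails.map (runLen s)) = t2.tails.map (runLen (c :: s)) := by
  intro t2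
  induction t2 with
  | nil => simp [rowB, List.tails, runLen_nil_right]
  | cons ch rest ih =>
    rw [List.tails_cons, List.map_cons, rowB, List.tail_cons, ih]
    congr 1
    rw [headD_tails_map]
    show (if c = ch then runLen s rest + 1 else 0) = runLen (c :: s) (ch :: rest)
    simp only [runLen]

theorem map_runLen_nil (t2 : List Char) :
    t2.tails.map (runLen []) = List.replicate (t2.length + 1) 0 := by
  rw [List.eq_replicate_iff]
  refine ⟨by simp, ?_⟩
  intro b hb
  simp only [List.mem_map] at hb
  obtain ⟨u, _, hu⟩ := hb
  rw [← hu, runLen_nil_left]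

-- rowsB computes, for each i, the row of runLen values of the i-th suffix
theorem rowsB_spec (t2 : List Char) :
    ∀ t1 : List Char, rowsB t2 t1 = t1.tails.dropLast.map (fun s => t2.tails.map (runLen s)) := by
  intro t1
  induction t1 with
  | nil => simp [rowsB, List.tails]
  | cons c rest ih =>
    rw [rowsB, ih]
    rw [List.tails_cons]
    rw [show ((c :: rest) :: rest.tails).dropLast = (c :: rest) :: rest.tails.dropLast from by
      cases h : rest.tails with
      | nil => exact absurd h (tails_ne_nil' _)
      | cons a as => simp]
    rw [List.map_cons]
    congr 1
    have hhead : (rest.tails.dropLast.map (fun s => t2.tails.map (runLen s))).headD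
        (List.replicate (t2.length + 1) 0) = t2.tails.map (runLen rest) := by
      cases rest with
      | nil => simp [List.tails, map_runLen_nil]
      | cons a as =>
        rw [List.tails_cons]
        rw [show ((a :: as) :: as.tails).dropLast = (a :: as) :: as.tails.dropLast from by
          cases h : as.tails with
          | nil => exact absurd h (tails_ne_nil' _)
          | cons b bs => simp]
        simp
    rw [hhead, rowB_spec]

theorem tails_flatMap_cellOut (s : List Char) (t2 : List Char) :
    t2.tails.flatMap (fun u => cellOut s u) =
      (List.range t2.length).flatMap (fun j => cellOut s (t2.drop j)) := by
  rw [← range_flatMap_drop t2 (fun u => cellOut s u)]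
  simp [cellOut_nil_right]

-- flattening the zip of the dp rows with the suffixes, structurally
theorem zip_tails_flatMap (t2 : List Char) (Phi : List Nat × List Char → List String) :
    ∀ l : List Char,
      ((l.tails.dropLast.map (fun s => t2.tails.map (runLen s))).zip l.tails).flatMap Phi =
        l.tails.dropLast.flatMap (fun s => Phi (t2.tails.map (runLen s), s)) := by
  intro l
  induction l with
  | nil => simp [List.tails]
  | cons c rest ih =>
    rw [List.tails_cons]
    rw [show ((c :: rest) :: rest.tails).dropLast = (c :: rest) :: rest.tails.dropLast from by
      cases h : rest.tails with
      | nil => exact absurd h (tails_ne_nil' _)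
      | cons a as => simp]
    rw [List.map_cons, List.zip_cons_cons, List.flatMap_cons, ih, List.flatMap_cons]

-- ===== VERDICT (by name: the statement is the Claim_ definition above) =====
theorem matching_substr_spec : Claim_equal_matching_substr := by
  intro txt1 txt2 _
  unfold Spec_matching_substr matching_substr matching_substr_alt
  dsimp only
  set t1 := txt1.toList with ht1
  set t2 := txt2.toList with ht2
  have hnil : (List.range t2.length).flatMap (fun j => cellOut ([] : List Char) (t2.drop j)) = [] := by
    simp [cellOut, runLen_nil_left]
  -- A side: collapse the folds into flatMaps of cellOut
  have hinner : ∀ i, i < t1.length → ∀ r : List String,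
      (List.range t2.length).foldl (fun r j =>
        if t1.getD i ' ' = t2.getD j ' ' then
          loopA t1 t2 i j 1 (r ++ [String.mk [t1.getD i ' ']])
        else r) r =
      r ++ (List.range t2.length).flatMap (fun j => cellOut (t1.drop i) (t2.drop j)) := by
    intro i hi r
    apply foldl_append_gen
    intro r' j hj
    rw [List.mem_range] at hj
    rw [List.getD_eq_getElem t1 ' ' hi, List.getD_eq_getElem t2 ' ' hj]
    by_cases hc : t1[i] = t2[j]
    · rw [if_pos hc, loopA_spec]
      unfold cellOut
      rw [List.drop_eq_getElem_cons hi, List.drop_eq_getElem_cons hj]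
      simp only [runLen, if_pos hc]
      rw [List.range_succ_eq_map]
      simp only [List.map_cons, List.map_map, List.append_assoc, List.cons_append,
        List.take_succ_cons, List.take_zero]
      congr 2
      apply List.map_congr_left
      intro k _
      simp only [Function.comp_apply]
      rw [show 1 + 1 + k = (k + 1) + 1 from by omega, List.take_succ_cons]
    · rw [if_neg hc]
      unfold cellOut
      rw [List.drop_eq_getElem_cons hi, List.drop_eq_getElem_cons hj]
      simp [runLen, hc]
  have hA : (List.range t1.length).foldl (fun r i =>
      (List.range t2.length).foldl (fun r j =>
        if t1.getD i ' ' = t2.getD j ' ' then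
          loopA t1 t2 i j 1 (r ++ [String.mk [t1.getD i ' ']])
        else r) r) [] =
      (List.range t1.length).flatMap (fun i =>
        (List.range t2.length).flatMap (fun j => cellOut (t1.drop i) (t2.drop j))) := by
    rw [foldl_append_gen _ _
      (fun i => (List.range t2.length).flatMap (fun j => cellOut (t1.drop i) (t2.drop j)))
      (fun r i hi => hinner i (List.mem_range.mp hi) r) []]
    simp
  rw [hA]
  -- turn the A side into a flatMap over the proper suffixes of t1
  have h1 := range_flatMap_drop t1
      (fun s => (List.range t2.length).flatMap (fun j => cellOut s (t2.drop j)))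
  rw [hnil, List.append_nil] at h1
  rw [h1]
  -- B side: rows are the runLen rows; flatten the zip structurally
  rw [rowsB_spec, zip_tails_flatMap]
  -- A side: split off the final empty suffix of tails
  conv_lhs => rw [tails_eq_dropLast_concat t1]
  rw [List.flatMap_append, List.flatMap_cons, List.flatMap_nil, List.append_nil, hnil,
    List.append_nil]
  -- pointwise: the dp row emission at suffix s is exactly A's cellOut emission
  congr 1
  funext s
  rw [List.flatMap_map, ← tails_flatMap_cellOut]
  rfl
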